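-- pv_equiv track=rewrite | github.com/andregil18/AndreinaGil | PruebaAndreinaGilPython.py | validation8
-- ===== SOURCE A (Python) =====
-- def validation8(num):
--     first8 = False
--     for n in range(len(num)):
--         if num[n] == '8' and first8 == False:
--             first8 = True
--         elif num[n] == '8' and num[n-1] != '8' :
--             return  False
--     return True
-- ===== SOURCE B (Python) =====
-- def validation8(num):
--     eights = [k for k in range(len(num)) if num[k] == '8']
--     if not eights:
--         return True
--     return eights[-1] - eights[0] + 1 == len(eights)
-- ===== Notes on version B (the rewrite author's own statement) =====
-- stated objective: simpler
-- what changed: Replaces A's stateful flag loop with early return by collecting the indices of '8' in one pass and deciding contiguity with the closed-form check last - first + 1 == count.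
import Mathlib
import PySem

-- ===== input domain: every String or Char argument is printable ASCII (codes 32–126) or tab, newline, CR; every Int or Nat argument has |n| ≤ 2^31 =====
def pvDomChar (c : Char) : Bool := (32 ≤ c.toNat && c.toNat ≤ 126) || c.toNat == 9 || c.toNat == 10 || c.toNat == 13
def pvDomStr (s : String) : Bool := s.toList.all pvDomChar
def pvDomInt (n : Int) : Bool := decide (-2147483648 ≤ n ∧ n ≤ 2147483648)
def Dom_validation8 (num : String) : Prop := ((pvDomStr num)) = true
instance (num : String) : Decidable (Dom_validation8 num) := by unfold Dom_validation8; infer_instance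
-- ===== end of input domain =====

-- B replaces A's stateful flag loop by collecting the '8'-indices once and a closed-form
-- contiguity check (last - first + 1 = count); objective: simpler.


-- ===== PORT A =====
-- for n in range(len(num)) with the flag `first8` and the early `return False`
def vA_loop (cs : List Char) (n : Nat) (first8 : Bool) : Bool :=
  if h : n < cs.length then
    if cs[n] = '8' ∧ first8 = false then
      vA_loop cs (n + 1) true
    else if cs[n] = '8' ∧ ¬ (PySem.List.pyGet? cs ((n : Int) - 1) = some '8') then
      false
    else
      vA_loop cs (n + 1) first8
  else
    true
termination_by cs.length - n

def validation8 (num : String) : Bool := vA_loop num.toList 0 false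

-- ===== PORT B =====
def validation8_alt (num : String) : Bool :=
  let cs := num.toList
  let eights := (List.range cs.length).filter (fun k => cs[k]? == some '8')
  match eights with
  | [] => true
  | a :: t => decide ((a :: t).getLastD 0 - a + 1 = (a :: t).length)

-- ===== PRECONDITION & SPEC =====
def Spec_validation8 (num : String) (out : Bool) : Prop := out = validation8_alt num
instance (num : String) (out : Bool) : Decidable (Spec_validation8 num out) := by unfold Spec_validation8; infer_instance

-- ===== CLAIM (what is proved, stated in full; the proofs are below) =====
def Claim_equal_validation8 : Prop := ∀ (num : String), Dom_validation8 num → Spec_validation8 num (validation8 num)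

-- ===== LEMMAS AND PROOFS =====

-- `A8 cs k`: position k exists and holds '8'
def A8 (cs : List Char) (k : Nat) : Prop := cs[k]? = some '8'

lemma A8_lt {cs : List Char} {k : Nat} (h : A8 cs k) : k < cs.length := by
  unfold A8 at h
  exact (List.getElem?_eq_some_iff.mp h).1

lemma A8_iff {cs : List Char} {n : Nat} (h : n < cs.length) : A8 cs n ↔ cs[n] = '8' := by
  unfold A8
  simp [List.getElem?_eq_getElem h]

-- characterization of A's loop, both flag states at once
lemma vA_char (cs : List Char) : ∀ m n, cs.length - n = m →
    ((1 ≤ n → (vA_loop cs n true = true ↔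
        ∀ k, n ≤ k → A8 cs k → A8 cs (k - 1))) ∧
     (vA_loop cs n false = true ↔
        ∀ k, n ≤ k → A8 cs k → (∃ j, n ≤ j ∧ j < k ∧ A8 cs j) → A8 cs (k - 1))) := by
  have base : ∀ n, ¬ n < cs.length →
      ((1 ≤ n → (vA_loop cs n true = true ↔
          ∀ k, n ≤ k → A8 cs k → A8 cs (k - 1))) ∧
       (vA_loop cs n false = true ↔
          ∀ k, n ≤ k → A8 cs k → (∃ j, n ≤ j ∧ j < k ∧ A8 cs j) → A8 cs (k - 1))) := by
    intro n hn
    have hloop : ∀ b, vA_loop cs n b = true := by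
      intro b; rw [vA_loop]; simp [hn]
    refine ⟨fun _ => ⟨fun _ k hk h8 => absurd (A8_lt h8) (by omega), fun _ => hloop true⟩,
            ⟨fun _ k hk h8 _ => absurd (A8_lt h8) (by omega), fun _ => hloop false⟩⟩
  intro m
  induction m with
  | zero =>
      intro n hm
      exact base n (by omega)
  | succ m ih =>
      intro n hm
      by_cases hn : n < cs.length
      · have ih' := ih (n + 1) (by omega)
        have hA8n : A8 cs n ↔ cs[n] = '8' := A8_iff hn
        constructor
        · -- flag = true
          intro hn1
          rw [vA_loop, dif_pos hn, if_neg (by simp : ¬ (cs[n] = '8' ∧ (true : Bool) = false))]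
          have hprev : PySem.List.pyGet? cs ((n : Int) - 1) = cs[n - 1]? := by
            have : ((n : Int) - 1) = ((n - 1 : Nat) : Int) := by omega
            rw [this, PySem.List.pyGet?_natCast]
          by_cases h8 : cs[n] = '8'
          · by_cases hp : A8 cs (n - 1)
            · have hp8 : cs[n - 1]? = some '8' := hp
              rw [if_neg (by rw [hprev, hp8]; simp)]
              rw [(ih'.1 (by omega))]
              constructor
              · intro H k hk hk8
                rcases Nat.eq_or_lt_of_le hk with rfl | hlt
                · exact hp
                · exact H k (by omega) hk8
              · intro H k hk hk8
                exact H k (by omega) hk8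
            · rw [if_pos ⟨h8, by rw [hprev]; intro hc; exact hp hc⟩]
              constructor
              · intro hf; exact absurd hf (by simp)
              · intro H
                exact absurd (H n le_rfl (hA8n.mpr h8)) hp
          · rw [if_neg (by simp [h8])]
            rw [(ih'.1 (by omega))]
            have hnot : ¬ A8 cs n := fun h => h8 (hA8n.mp h)
            constructor
            · intro H k hk hk8
              rcases Nat.eq_or_lt_of_le hk with rfl | hlt
              · exact absurd hk8 hnot
              · exact H k (by omega) hk8
            · intro H k hk hk8
              exact H k (by omega) hk8
        · -- flag = false
          rw [vA_loop, dif_pos hn]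
          by_cases h8 : cs[n] = '8'
          · rw [if_pos ⟨h8, rfl⟩]
            rw [(ih'.1 (by omega))]
            constructor
            · intro H k hk hk8 ⟨j, hj1, hj2, hj3⟩
              exact H k (by omega) hk8
            · intro H k hk hk8
              exact H k (by omega) hk8 ⟨n, le_rfl, by omega, hA8n.mpr h8⟩
          · rw [if_neg (by simp [h8]), if_neg (by simp [h8])]
            rw [ih'.2]
            have hnot : ¬ A8 cs n := fun h => h8 (hA8n.mp h)
            constructor
            · intro H k hk hk8 ⟨j, hj1, hj2, hj3⟩
              have hjn : j ≠ n := fun h => hnot (h ▸ hj3)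
              exact H k (by omega) hk8 ⟨j, by omega, hj2, hj3⟩
            · intro H k hk hk8 ⟨j, hj1, hj2, hj3⟩
              have hjn : j ≠ n := fun h => hnot (h ▸ hj3)
              exact H k (by omega) hk8 ⟨j, by omega, hj2, hj3⟩
      · exact base n hn

-- the common characterization: every '8' preceded by some '8' has '8' right before it
def Good (cs : List Char) : Prop :=
  ∀ k, A8 cs k → (∃ j, j < k ∧ A8 cs j) → A8 cs (k - 1)

lemma validation8_iff (num : String) : validation8 num = true ↔ Good num.toList := by
  unfold validation8 Good
  rw [(vA_char num.toList (num.toList.length) 0 rfl).2]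
  constructor
  · intro H k hk8 ⟨j, hj, hj8⟩
    exact H k (Nat.zero_le _) hk8 ⟨j, Nat.zero_le _, hj, hj8⟩
  · intro H k _ hk8 ⟨j, _, hj, hj8⟩
    exact H k hk8 ⟨j, hj, hj8⟩

-- B-side lemmas
lemma mem_eights {cs : List Char} {k : Nat} :
    k ∈ (List.range cs.length).filter (fun k => cs[k]? == some '8') ↔ A8 cs k := by
  rw [List.mem_filter, List.mem_range]
  unfold A8
  constructor
  · intro ⟨_, h⟩; exact beq_iff_eq.mp h
  · intro h; exact ⟨A8_lt h, beq_iff_eq.mpr h⟩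

lemma getLastD_ge {t : List Nat} : ∀ {a d : Nat}, (a :: t).Pairwise (· < ·) →
    a + t.length ≤ (a :: t).getLastD d := by
  induction t with
  | nil => intro a d _; simp
  | cons b t' ih =>
      intro a d hp
      have hab : a < b := (List.pairwise_cons.mp hp).1 b (by simp)
      have hbt := (List.pairwise_cons.mp hp).2
      have h2 := ih (a := b) (d := a) hbt
      simp only [List.getLastD_cons] at h2 ⊢
      simp only [List.length_cons] at h2 ⊢
      omega
  
lemma contig_iff : ∀ (t : List Nat) (a d : Nat), (a :: t).Pairwise (· < ·) →
    ((a :: t).getLastD d - a + 1 = (a :: t).length ↔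
      ∀ k ∈ a :: t, a < k → (k - 1) ∈ a :: t) := by
  intro t
  induction t with
  | nil =>
      intro a d _
      simp
  | cons b t' ih =>
      intro a d hp
      have hab : a < b := (List.pairwise_cons.mp hp).1 b (by simp)
      have hbt : (b :: t').Pairwise (· < ·) := (List.pairwise_cons.mp hp).2
      have hbt' : ∀ x ∈ t', b < x := (List.pairwise_cons.mp hbt).1
      have hge : b + t'.length ≤ (b :: t').getLastD a := getLastD_ge hbt
      rw [List.getLastD_cons]
      rcases Nat.lt_or_ge (a + 1) b with hgap | hadj
      · -- a gap: both sides false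
        constructor
        · intro h
          exfalso
          simp only [List.length_cons] at h
          omega
        · intro H
          exfalso
          have := H b (by simp) hab
          rcases List.mem_cons.mp this with h1 | h2
          · omega
          · rcases List.mem_cons.mp h2 with h1 | h2
            · omega
            · have := hbt' _ h2; omega
      · -- b = a + 1
        have hb : b = a + 1 := by omega
        have ihab := ih b a hbt
        simp only [List.length_cons] at ihab ⊢
        constructor
        · intro h k hk hak
          rcases List.mem_cons.mp hk with rfl | hk'
          · omega
          · rcases List.mem_cons.mp hk' with rfl | hk''
            · exact List.mem_cons.mpr (Or.inl (by omega))
            · have hbk : b < k := hbt' _ hk''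
              have := (ihab.mp (by omega)) k hk' hbk
              exact List.mem_cons.mpr (Or.inr this)
        · intro H
          have : (b :: t').getLastD a - b + 1 = t'.length + 1 := by
            apply ihab.mpr
            intro k hk hbk
            have hk1 := H k (List.mem_cons.mpr (Or.inr hk)) (by omega)
            rcases List.mem_cons.mp hk1 with h1 | h2
            · omega
            · exact h2
          omega

lemma alt_unfold (num : String) : validation8_alt num =
    (match (List.range num.toList.length).filter (fun k => num.toList[k]? == some '8') with
     | [] => true
     | a :: t => decide ((a :: t).getLastD 0 - a + 1 = (a :: t).length)) := rfl

lemma validation8_alt_iff (num : String) : validation8_alt num = true ↔ Good num.toList := by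
  unfold Good
  rw [alt_unfold]
  have hpw : ((List.range num.toList.length).filter
      (fun k => num.toList[k]? == some '8')).Pairwise (· < ·) :=
    (List.pairwise_lt_range).filter _
  cases he : (List.range num.toList.length).filter (fun k => num.toList[k]? == some '8') with
  | nil =>
      constructor
      · intro _ k hk8 _
        have : k ∈ (List.range num.toList.length).filter (fun k => num.toList[k]? == some '8') :=
          mem_eights.mpr hk8
        rw [he] at this
        exact absurd this (List.not_mem_nil)
      · intro _; rfl
  | cons a t =>
      rw [he] at hpw
      have hmem : ∀ k, k ∈ a :: t ↔ A8 num.toList k := fun k => by rw [← he]; exact mem_eights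
      have hhead : ∀ x ∈ a :: t, a ≤ x := by
        intro x hx
        rcases List.mem_cons.mp hx with rfl | hx'
        · exact le_rfl
        · exact le_of_lt ((List.pairwise_cons.mp hpw).1 x hx')
      rw [show (match (a :: t : List Nat) with
            | [] => true
            | a :: t => decide ((a :: t).getLastD 0 - a + 1 = (a :: t).length)) =
          decide ((a :: t).getLastD 0 - a + 1 = (a :: t).length) from rfl]
      rw [decide_eq_true_iff, contig_iff t a 0 hpw]
      constructor
      · intro H k hk8 ⟨j, hjk, hj8⟩
        have hkmem := (hmem k).mpr hk8
        have hjmem := (hmem j).mpr hj8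
        have : a < k := lt_of_le_of_lt (hhead j hjmem) hjk
        exact (hmem (k - 1)).mp (H k hkmem this)
      · intro H k hkmem hak
        have hk8 := (hmem k).mp hkmem
        have ha8 := (hmem a).mp (List.mem_cons_self)
        exact (hmem (k - 1)).mpr (H k hk8 ⟨a, hak, ha8⟩)

-- ===== VERDICT (by name: the statement is the Claim_ definition above) =====
theorem validation8_spec : Claim_equal_validation8 := by
  intro num _
  unfold Spec_validation8
  rw [Bool.eq_iff_iff, validation8_iff, validation8_alt_iff]
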